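-- pv_equiv track=rewrite | github.com/Pckk-solvers/Water-Info-Acquirer | src/hydrology_graphs/services/usecases.py | _normalized_event_window_days_list
-- ===== SOURCE A (Python) =====
-- def _normalized_event_window_days_list(raw: list[int]) -> list[int]:
--     """イベント窓の入力を 3/5 日の重複なし順序で正規化する。"""
--
--     ordered: list[int] = []
--     for day in raw:
--         if day not in (3, 5):
--             continue
--         if day in ordered:
--             continue
--         ordered.append(day)
--     return ordered
-- ===== SOURCE B (Python) =====
-- def _normalized_event_window_days_list(raw: list[int]) -> list[int]:
--     """イベント窓の入力を 3/5 日の重複なし順序で正規化する。"""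
--     # Closed-form: the answer is fully determined by the first occurrence
--     # positions of 3 and 5 in the input; no loop over accumulators needed.
--     try:
--         i3 = raw.index(3)
--     except ValueError:
--         i3 = None
--     try:
--         i5 = raw.index(5)
--     except ValueError:
--         i5 = None
--     if i3 is None and i5 is None:
--         return []
--     if i5 is None:
--         return [3]
--     if i3 is None:
--         return [5]
--     return [3, 5] if i3 < i5 else [5, 3]
-- ===== Notes on version B (the rewrite author's own statement) =====
-- stated objective: alternative
-- what changed: A runs a fused filter-and-dedup loop over the input with a membership scan of the growing output; B computes the answer in closed form from the first-occurrence indices of 3 and 5 (raw.index), returning one of the five possible result lists by comparing those two indices, with no accumulator loop at all.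
import Mathlib
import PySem

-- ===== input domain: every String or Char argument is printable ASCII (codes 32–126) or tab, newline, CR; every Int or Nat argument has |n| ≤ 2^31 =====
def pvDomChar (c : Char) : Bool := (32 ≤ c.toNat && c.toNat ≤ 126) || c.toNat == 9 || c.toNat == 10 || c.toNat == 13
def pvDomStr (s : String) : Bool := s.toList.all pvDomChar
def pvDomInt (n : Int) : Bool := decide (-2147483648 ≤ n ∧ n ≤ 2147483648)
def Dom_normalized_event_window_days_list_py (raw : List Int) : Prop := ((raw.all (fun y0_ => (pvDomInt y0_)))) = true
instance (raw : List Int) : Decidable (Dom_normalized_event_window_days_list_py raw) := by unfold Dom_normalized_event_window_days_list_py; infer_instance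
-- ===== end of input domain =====

-- B replaces A's fused filter-and-dedup accumulator loop by a closed-form case analysis on the first-occurrence indices of 3 and 5 (alternative decomposition, no accumulator).

-- ===== PORT A =====
-- A: one loop; skip day ∉ (3,5), skip day already in ordered, else append.
def normalized_event_window_days_list_py (raw : List Int) : List Int :=
  raw.foldl
    (fun ordered day =>
      if ¬(day = 3 ∨ day = 5) then ordered
      else if ordered.contains day then ordered
      else ordered ++ [day])
    []

-- ===== PORT B =====
-- B: raw.index(3)/raw.index(5) (None when ValueError), then the four-way case analysis.
def normalized_event_window_days_list_py_alt (raw : List Int) : List Int :=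
  match PySem.List.index? raw 3, PySem.List.index? raw 5 with
  | none, none => []
  | some _, none => [3]
  | none, some _ => [5]
  | some i3, some i5 => if i3 < i5 then [3, 5] else [5, 3]

-- ===== PRECONDITION & SPEC =====
def Spec_normalized_event_window_days_list_py (raw : List Int) (out : List Int) : Prop := out = normalized_event_window_days_list_py_alt raw
instance (raw : List Int) (out : List Int) : Decidable (Spec_normalized_event_window_days_list_py raw out) := by unfold Spec_normalized_event_window_days_list_py; infer_instance

-- ===== CLAIM (what is proved, stated in full; the proofs are below) =====
def Claim_equal_normalized_event_window_days_list_py : Prop := ∀ (raw : List Int), Dom_normalized_event_window_days_list_py raw → Spec_normalized_event_window_days_list_py raw (normalized_event_window_days_list_py raw)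

-- ===== LEMMAS AND PROOFS =====

-- A's loop step, named for the lemmas.
def pvStep (ordered : List Int) (day : Int) : List Int :=
  if ¬(day = 3 ∨ day = 5) then ordered
  else if ordered.contains day then ordered
  else ordered ++ [day]

theorem pvStep_eq : (fun ordered day =>
    if ¬(day = 3 ∨ day = 5) then ordered
    else if (ordered : List Int).contains day then ordered
    else ordered ++ [day]) = pvStep := rfl

-- [3,5] and [5,3] are absorbing states of A's loop.
theorem pv_abs : ∀ (raw : List Int),
    List.foldl pvStep [3, 5] raw = [3, 5] ∧ List.foldl pvStep [5, 3] raw = [5, 3] := by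
  intro raw
  induction raw with
  | nil => exact ⟨rfl, rfl⟩
  | cons d t ih =>
      have h1 : pvStep [3, 5] d = [3, 5] := by
        unfold pvStep; by_cases h : d = 3 ∨ d = 5
        · rcases h with h | h <;> subst h <;> simp
        · simp [h]
      have h2 : pvStep [5, 3] d = [5, 3] := by
        unfold pvStep; by_cases h : d = 3 ∨ d = 5
        · rcases h with h | h <;> subst h <;> simp
        · simp [h]
      simpa [List.foldl_cons, h1, h2] using ih

-- From accumulator [3]: result is [3,5] iff a 5 occurs later, else [3]; symmetric for [5].
theorem pv_from3 : ∀ (raw : List Int),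
    List.foldl pvStep [3] raw = if 5 ∈ raw then [3, 5] else [3] := by
  intro raw
  induction raw with
  | nil => simp
  | cons d t ih =>
      by_cases h5 : d = 5
      · subst h5
        have : pvStep [3] 5 = [3, 5] := by unfold pvStep; simp
        simp [List.foldl_cons, this, (pv_abs t).1]
      · have hs : pvStep [3] d = [3] := by
          unfold pvStep
          by_cases h : d = 3 ∨ d = 5
          · have h3 : d = 3 := by tauto
            subst h3; simp
          · simp [h]
        simp [List.foldl_cons, hs, ih, Ne.symm h5]

theorem pv_from5 : ∀ (raw : List Int),
    List.foldl pvStep [5] raw = if 3 ∈ raw then [5, 3] else [5] := by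
  intro raw
  induction raw with
  | nil => simp
  | cons d t ih =>
      by_cases h3 : d = 3
      · subst h3
        have : pvStep [5] 3 = [5, 3] := by unfold pvStep; simp
        simp [List.foldl_cons, this, (pv_abs t).2]
      · have hs : pvStep [5] d = [5] := by
          unfold pvStep
          by_cases h : d = 3 ∨ d = 5
          · have h5 : d = 5 := by tauto
            subst h5; simp
          · simp [h]
        simp [List.foldl_cons, hs, ih, Ne.symm h3]

theorem pv_main : ∀ (raw : List Int),
    List.foldl pvStep [] raw = normalized_event_window_days_list_py_alt raw := by
  intro raw
  induction raw with
  | nil => rfl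
  | cons d t ih =>
      unfold normalized_event_window_days_list_py_alt
      by_cases h3 : d = 3
      · subst h3
        have hs : pvStep [] 3 = [3] := by unfold pvStep; simp
        rw [List.foldl_cons, hs, pv_from3 t,
          PySem.List.index?_cons_self (3 : Int) t]
        rw [PySem.List.index?_cons_of_ne t (by norm_num : (3 : Int) ≠ 5)]
        by_cases h5 : 5 ∈ t
        · obtain ⟨k, hk⟩ := Option.isSome_iff_exists.mp
            ((PySem.List.index?_isSome_iff t 5).mpr h5)
          rw [hk]
          simp [h5]
        · have : PySem.List.index? t (5 : Int) = none :=
            (PySem.List.index?_eq_none_iff t 5).mpr h5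
          rw [this]
          simp [h5]
      · by_cases h5 : d = 5
        · subst h5
          have hs : pvStep [] 5 = [5] := by unfold pvStep; simp
          rw [List.foldl_cons, hs, pv_from5 t,
            PySem.List.index?_cons_self (5 : Int) t]
          rw [PySem.List.index?_cons_of_ne t (by norm_num : (5 : Int) ≠ 3)]
          by_cases h3' : 3 ∈ t
          · obtain ⟨k, hk⟩ := Option.isSome_iff_exists.mp
              ((PySem.List.index?_isSome_iff t 3).mpr h3')
            rw [hk]
            simp [h3']
          · have : PySem.List.index? t (3 : Int) = none :=
              (PySem.List.index?_eq_none_iff t 3).mpr h3'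
            rw [this]
            simp [h3']
        · have hs : pvStep [] d = [] := by unfold pvStep; simp [h3, h5]
          rw [List.foldl_cons, hs, ih]
          unfold normalized_event_window_days_list_py_alt
          rw [PySem.List.index?_cons_of_ne t h3,
            PySem.List.index?_cons_of_ne t h5]
          cases PySem.List.index? t (3 : Int) <;>
            cases PySem.List.index? t (5 : Int) <;> simp <;> omega

-- ===== VERDICT (by name: the statement is the Claim_ definition above) =====
theorem normalized_event_window_days_list_py_spec : Claim_equal_normalized_event_window_days_list_py := by
  intro raw _
  unfold Spec_normalized_event_window_days_list_py normalized_event_window_days_list_py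
  rw [pvStep_eq]
  exact pv_main raw
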